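-- pv_equiv track=rewrite | github.com/pypi-data/pypi-mirror-398 | packages/clinkey-cli/clinkey_cli-2.0.1-py3-none-any.whl/clinkey_cli/generators/pattern.py | get_pattern_length
-- ===== SOURCE A (Python) =====
-- def get_pattern_length(pattern: str) -> int:
--     """Calculate final password length from pattern.
--
--     Parameters
--     ----------
--     pattern : str
--         Pattern to analyze.
--
--     Returns
--     -------
--     int
--         Final password length.
--
--     Examples
--     --------
--     >>> gen = PatternGenerator()
--     >>> gen.get_pattern_length("LLLL-DDDD")
--     9
--     """
--     length = 0
--     i = 0
--
--     while i < len(pattern):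
--         char = pattern[i]
--
--         # Custom character set [abc]
--         if char == "[":
--             close = pattern.find("]", i)
--             if close != -1:
--                 length += 1
--                 i = close + 1
--                 continue
--
--         # All characters contribute 1 to length
--         length += 1
--         i += 1
--
--     return length
-- ===== SOURCE B (Python) =====
-- def get_pattern_length(pattern: str) -> int:
--     """Chunk-based: repeatedly partition off the text before the next '[',
--     count it wholesale, then count the bracket group (up to the first ']') as 1."""
--     length = 0
--     rest = pattern
--     while rest:
--         head, sep, tail = rest.partition("[")
--         length += len(head)
--         if not sep:
--             break
--         grp, sep2, tail2 = tail.partition("]")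
--         if not sep2:
--             # unclosed '[': it and everything after count literally
--             length += 1 + len(tail)
--             break
--         length += 1
--         rest = tail2
--     return length
-- ===== Notes on version B (the rewrite author's own statement) =====
-- stated objective: faster
-- what changed: Replaced the index-driven while loop that steps character by character (with find from the current index) by chunkwise processing: repeatedly partition the remaining string at the next opening bracket to count the plain text wholesale, then partition once more at the first closing bracket to count the group as one character.
import Mathlib
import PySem

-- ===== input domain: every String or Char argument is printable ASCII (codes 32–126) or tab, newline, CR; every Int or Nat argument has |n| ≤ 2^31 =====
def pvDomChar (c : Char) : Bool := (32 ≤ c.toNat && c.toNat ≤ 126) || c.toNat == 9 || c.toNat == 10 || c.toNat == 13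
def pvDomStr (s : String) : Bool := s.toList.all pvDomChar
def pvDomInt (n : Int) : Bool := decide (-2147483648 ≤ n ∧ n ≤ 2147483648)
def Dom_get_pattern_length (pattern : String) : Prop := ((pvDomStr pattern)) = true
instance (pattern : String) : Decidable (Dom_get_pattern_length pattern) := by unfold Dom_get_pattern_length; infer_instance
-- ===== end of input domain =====

-- B replaces A's per-character index loop by chunkwise string-partition processing (measured faster in a timing run).

-- ===== PORT A =====
-- A's while loop over the index i; `pattern.find("]", i)` is PySem.Chars.findFrom on the
-- character list (i is Python's int index, kept as Nat since it is always ≥ 0; when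
-- close != -1 the next index close+1 is nonnegative, so .toNat is exact).
def pvALoop (cs : List Char) (length : Int) (i : Nat) : Int :=
  if h : i < cs.length then
    let char := cs[i]
    if char = '[' then
      let close := PySem.Chars.findFrom cs [']'] (i : Int) none
      if h2 : close ≠ -1 then
        pvALoop cs (length + 1) (close + 1).toNat
      else
        pvALoop cs (length + 1) (i + 1)
    else
      pvALoop cs (length + 1) (i + 1)
  else length
termination_by cs.length - i
decreasing_by
  · have hs := PySem.Chars.findFrom_natCast_spec cs [']'] i (Nat.le_of_lt h) h2
    omega
  · omega
  · omega

def get_pattern_length (pattern : String) : Int :=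
  pvALoop pattern.toList 0 0

-- ===== PORT B =====
-- Source B's loop: `rest.partition("[")` is (rest.takeWhile (· ≠ '['), sep, (rest.dropWhile (· ≠ '[')).tail)
-- with sep empty iff the dropWhile result is empty — exact for a single-character separator.
def pvBLoop (length : Int) (rest : List Char) : Int :=
  if hr : rest.isEmpty then length
  else
    let head := rest.takeWhile (· ≠ '[')
    let d := rest.dropWhile (· ≠ '[')
    let length1 := length + head.length
    if hd : d.isEmpty then length1          -- no '[' left: count the tail text and stop
    else
      let tail := d.tail
      let g := tail.dropWhile (· ≠ ']')
      if hg : g.isEmpty then length1 + 1 + tail.length   -- unclosed '[': everything counts literally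
      else pvBLoop (length1 + 1) g.tail
termination_by rest.length
decreasing_by
  have h1 : (rest.dropWhile (· ≠ '[')).length ≤ rest.length := List.length_dropWhile_le _ _
  have h2 : ((rest.dropWhile (· ≠ '[')).tail.dropWhile (· ≠ ']')).length ≤ (rest.dropWhile (· ≠ '[')).tail.length :=
    List.length_dropWhile_le _ _
  have h3 : (rest.dropWhile (· ≠ '[')) ≠ [] := by simpa only [List.isEmpty_iff] using hd
  have h4 : 0 < (rest.dropWhile (· ≠ '[')).length := List.length_pos_of_ne_nil h3
  have h5 : (rest.dropWhile (· ≠ '[')).tail.length = (rest.dropWhile (· ≠ '[')).length - 1 :=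
    List.length_tail
  simp only [List.length_tail]
  omega

def get_pattern_length_alt (pattern : String) : Int :=
  pvBLoop 0 pattern.toList

-- ===== PRECONDITION & SPEC =====
def Spec_get_pattern_length (pattern : String) (out : Int) : Prop := out = get_pattern_length_alt pattern
instance (pattern : String) (out : Int) : Decidable (Spec_get_pattern_length pattern out) := by unfold Spec_get_pattern_length; infer_instance

-- ===== CLAIM (what is proved, stated in full; the proofs are below) =====
def Claim_equal_get_pattern_length : Prop := ∀ (pattern : String), Dom_get_pattern_length pattern → Spec_get_pattern_length pattern (get_pattern_length pattern)

-- ===== LEMMAS AND PROOFS =====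

-- common reference function: count 1 per bracket group (up to the first ']'), 1 per other char
def pvF : List Char → Int
  | [] => 0
  | c :: rest =>
    if c = '[' ∧ ']' ∈ rest then 1 + pvF ((rest.dropWhile (· ≠ ']')).tail)
    else 1 + pvF rest
termination_by l => l.length
decreasing_by
  · have h2 : (rest.dropWhile (· ≠ ']')).length ≤ rest.length := List.length_dropWhile_le _ _
    simp only [List.length_tail, List.length_cons]
    omega
  · simp

lemma pvF_no_close (r : List Char) (h : ']' ∉ r) : pvF r = r.length := by
  induction r with
  | nil => simp [pvF]
  | cons c t ih =>
    have hc : ']' ∉ t := fun hm => h (List.mem_cons_of_mem _ hm)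
    rw [pvF]
    simp only [hc, and_false, if_false, ih hc]
    simp
    omega

lemma find_go_single (c : Char) (s : List Char) (k : Nat) :
    PySem.Chars.find.go [c] s k =
      if c ∈ s then (((k + (s.takeWhile (· ≠ c)).length : Nat)) : Int) else -1 := by
  induction s generalizing k with
  | nil => simp [PySem.Chars.find.go]
  | cons h t ih =>
    rw [PySem.Chars.find.go]
    by_cases hc : h = c
    · subst hc
      simp [List.isPrefixOf, List.takeWhile]
    · have hpre : List.isPrefixOf [c] (h :: t) = false := by
        simp [List.isPrefixOf]
        exact fun e => (hc e.symm).elim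
      rw [hpre]
      simp only [Bool.false_eq_true, if_false, ih]
      have hmem : (c ∈ h :: t) ↔ c ∈ t := by
        constructor
        · intro hm
          rcases List.mem_cons.mp hm with he | hm'
          · exact absurd he.symm hc
          · exact hm'
        · exact List.mem_cons_of_mem _
      rw [if_congr hmem rfl rfl]
      by_cases hm : c ∈ t
      · simp only [hm, if_pos]
        have hpc : (decide (h ≠ c)) = true := by simp [hc]
        simp only [List.takeWhile, hpc, List.length_cons]
        push_cast
        ring
      · simp [hm]

lemma find_single (c : Char) (s : List Char) :
    PySem.Chars.find s [c] =
      if c ∈ s then (((s.takeWhile (· ≠ c)).length : Nat) : Int) else -1 := by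
  rw [PySem.Chars.find, find_go_single]
  simp

lemma dropWhile_eq_drop {α : Type} (p : α → Bool) (l : List α) :
    l.dropWhile p = l.drop (l.takeWhile p).length := by
  induction l with
  | nil => simp
  | cons h t ih =>
    by_cases hp : p h
    · simp [List.dropWhile, List.takeWhile, hp, ih]
    · simp [List.dropWhile, List.takeWhile, hp]

-- A's loop computes pvF of the remaining suffix
lemma pvALoop_eq_pvF (cs : List Char) :
    ∀ n i length, cs.length - i ≤ n → pvALoop cs length i = length + pvF (cs.drop i) := by
  intro n
  induction n with
  | zero =>
    intro i length hn
    have hi : cs.length ≤ i := by omega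
    rw [pvALoop.eq_def]
    simp [Nat.not_lt.mpr hi, List.drop_eq_nil_of_le hi, pvF]
  | succ n ih =>
    intro i length hn
    by_cases h : i < cs.length
    · have hdrop : cs.drop i = cs[i] :: cs.drop (i + 1) := List.drop_eq_getElem_cons h
      set rest := cs.drop (i + 1) with hrest
      have hfind : PySem.Chars.findFrom cs [']'] (i : Int) none =
          if PySem.Chars.find (cs.drop i) [']'] = -1 then -1
          else (i : Int) + PySem.Chars.find (cs.drop i) [']'] :=
        PySem.Chars.findFrom_natCast cs [']'] i (Nat.le_of_lt h)
      by_cases hbr : cs[i] = '['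
      · -- the '[' branch; find looks for ']' in '[' :: rest
        have hfd : PySem.Chars.find (cs.drop i) [']'] =
            if ']' ∈ rest then (((rest.takeWhile (· ≠ ']')).length : Nat) : Int) + 1 else -1 := by
          rw [hdrop, hbr, find_single]
          have hmem : ((']' : Char) ∈ '[' :: rest) ↔ (']' : Char) ∈ rest := by
            constructor
            · intro hx
              rcases List.mem_cons.mp hx with he | hx'
              · exact absurd he (by decide)
              · exact hx'
            · exact List.mem_cons_of_mem _
          rw [if_congr hmem rfl rfl]
          by_cases hm : ']' ∈ rest
          · rw [if_pos hm, if_pos hm]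
            have hpc : (decide (('[' : Char) ≠ ']')) = true := by decide
            simp only [List.takeWhile, hpc, List.length_cons]
            push_cast
            ring
          · simp [hm]
        by_cases hm : ']' ∈ rest
        · -- closing bracket found
          set t := (rest.takeWhile (· ≠ ']')).length with ht
          have hclose : PySem.Chars.findFrom cs [']'] (i : Int) none = (i : Int) + ((t : Int) + 1) := by
            rw [hfind, hfd, if_pos hm, if_neg (by omega)]
          conv_lhs => rw [pvALoop.eq_def]
          rw [dif_pos h, if_pos hbr,
              dif_pos (show PySem.Chars.findFrom cs [']'] (i : Int) none ≠ -1 by rw [hclose]; omega)]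
          have htn : (PySem.Chars.findFrom cs [']'] (i : Int) none + 1).toNat = i + t + 2 := by
            rw [hclose]; omega
          rw [htn]
          have htb : t ≤ rest.length := (List.takeWhile_prefix _).length_le
          have hrl : rest.length = cs.length - (i + 1) := by simp [hrest]
          rw [ih (i + t + 2) (length + 1) (by omega)]
          -- pvF of the suffix: drop i = '[' :: rest with ']' ∈ rest
          have hpf : pvF (cs.drop i) = 1 + pvF ((rest.dropWhile (· ≠ ']')).tail) := by
            rw [hdrop, hbr, pvF]
            simp [hm]
          have hsfx : (rest.dropWhile (· ≠ ']')).tail = cs.drop (i + t + 2) := by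
            rw [dropWhile_eq_drop, ← ht, hrest, List.tail_drop, List.drop_drop]
            congr 1
            omega
          rw [hpf, hsfx]
          ring
        · -- no closing bracket: close = -1, fall through
          have heq : PySem.Chars.findFrom cs [']'] (i : Int) none = -1 := by
            rw [hfind, hfd, if_neg hm]
            simp
          conv_lhs => rw [pvALoop.eq_def]
          rw [dif_pos h, if_pos hbr,
              dif_neg (show ¬ PySem.Chars.findFrom cs [']'] (i : Int) none ≠ -1 by rw [heq]; simp)]
          rw [ih (i + 1) (length + 1) (by omega)]
          have hpf : pvF (cs.drop i) = 1 + pvF rest := by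
            rw [hdrop, hbr, pvF]
            simp [hm]
          rw [hpf, hrest]
          ring
      · -- ordinary character
        conv_lhs => rw [pvALoop.eq_def]
        rw [dif_pos h, if_neg hbr]
        rw [ih (i + 1) (length + 1) (by omega)]
        have hpf : pvF (cs.drop i) = 1 + pvF rest := by
          rw [hdrop, pvF]
          simp [hbr]
        rw [hpf, hrest]
        ring
    · have hi : cs.length ≤ i := Nat.le_of_not_lt h
      rw [pvALoop.eq_def]
      simp [Nat.not_lt.mpr hi, List.drop_eq_nil_of_le hi, pvF]

-- pvF counts a '['-free prefix one per character
lemma pvF_chunk (r : List Char) :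
    pvF r = ((r.takeWhile (· ≠ '[')).length : Int) + pvF (r.dropWhile (· ≠ '[')) := by
  induction r with
  | nil => simp [pvF]
  | cons c t ih =>
    by_cases hc : c = '['
    · subst hc
      simp [List.takeWhile, List.dropWhile]
    · rw [pvF]
      have hnb : ¬ (c = '[' ∧ ']' ∈ t) := fun hx => hc hx.1
      rw [if_neg hnb, ih]
      simp [List.takeWhile, List.dropWhile, hc]
      ring

-- B's loop computes pvF of the remaining suffix
lemma pvBLoop_eq_pvF : ∀ n (rest : List Char) (length : Int), rest.length ≤ n →
    pvBLoop length rest = length + pvF rest := by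
  intro n
  induction n with
  | zero =>
    intro rest length hn
    have : rest = [] := List.eq_nil_of_length_eq_zero (by omega)
    subst this
    rw [pvBLoop]
    simp [pvF]
  | succ n ih =>
    intro rest length hn
    rw [pvBLoop.eq_def]
    by_cases hr : rest.isEmpty
    · rw [dif_pos hr]
      have : rest = [] := by simpa only [List.isEmpty_iff] using hr
      subst this
      simp [pvF]
    · rw [dif_neg hr]
      simp only []
      by_cases hde : (rest.dropWhile (· ≠ '[')).isEmpty
      · -- no '[' in rest
        rw [dif_pos hde]
        have hdnil : rest.dropWhile (· ≠ '[') = [] := by simpa only [List.isEmpty_iff] using hde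
        rw [pvF_chunk rest, hdnil]
        simp [pvF]
      · rw [dif_neg hde]
        have hdnil : rest.dropWhile (· ≠ '[') ≠ [] := by simpa only [List.isEmpty_iff] using hde
        -- the dropped part starts with '['
        have hdhead : (rest.dropWhile (· ≠ '[')).head hdnil = '[' := by
          have h2 := List.head_dropWhile_not (fun x => decide (x ≠ '[')) hdnil
          simpa using h2
        have hdc : rest.dropWhile (· ≠ '[') = '[' :: (rest.dropWhile (· ≠ '[')).tail := by
          conv_lhs => rw [← List.cons_head_tail hdnil]
          rw [hdhead]
        set tail := (rest.dropWhile (· ≠ '[')).tail with htail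
        have hsplit : pvF rest = ((rest.takeWhile (· ≠ '[')).length : Int) + pvF (rest.dropWhile (· ≠ '[')) :=
          pvF_chunk rest
        by_cases hge : (tail.dropWhile (· ≠ ']')).isEmpty
        · -- unclosed '['
          rw [dif_pos hge]
          have hgnil : tail.dropWhile (· ≠ ']') = [] := by simpa only [List.isEmpty_iff] using hge
          have hnm : ']' ∉ tail := by
            intro hm
            have h3 := List.dropWhile_eq_nil_iff.mp hgnil _ hm
            simp at h3
          have hpfd : pvF (rest.dropWhile (· ≠ '[')) = 1 + pvF tail := by
            rw [hdc, pvF]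
            simp [hnm]
          rw [hsplit, hpfd, pvF_no_close tail hnm]
          ring
        · rw [dif_neg hge]
          have hgnil : tail.dropWhile (· ≠ ']') ≠ [] := by simpa only [List.isEmpty_iff] using hge
          have hm : ']' ∈ tail := by
            by_contra hnm
            refine hgnil (List.dropWhile_eq_nil_iff.mpr ?_)
            intro x hx
            simp only [decide_eq_true_eq]
            intro he
            exact hnm (he ▸ hx)
          have hpfd : pvF (rest.dropWhile (· ≠ '[')) = 1 + pvF (tail.dropWhile (· ≠ ']')).tail := by
            rw [hdc, pvF]
            simp [hm]
          have hlen : (tail.dropWhile (· ≠ ']')).tail.length ≤ n := by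
            have h1 : (rest.dropWhile (· ≠ '[')).length ≤ rest.length := List.length_dropWhile_le _ _
            have h2 : (tail.dropWhile (· ≠ ']')).length ≤ tail.length := List.length_dropWhile_le _ _
            have h3 : tail.length = (rest.dropWhile (· ≠ '[')).length - 1 := by
              rw [htail, List.length_tail]
            have h4 : 0 < (rest.dropWhile (· ≠ '[')).length := List.length_pos_of_ne_nil hdnil
            have h5 : (tail.dropWhile (· ≠ ']')).tail.length = (tail.dropWhile (· ≠ ']')).length - 1 :=
              List.length_tail
            omega
          rw [ih (tail.dropWhile (· ≠ ']')).tail (length + (rest.takeWhile (· ≠ '[')).length + 1) hlen,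
              hsplit, hpfd]
          ring

-- ===== VERDICT (by name: the statement is the Claim_ definition above) =====
theorem get_pattern_length_spec : Claim_equal_get_pattern_length := by
  intro pattern _
  unfold Spec_get_pattern_length get_pattern_length get_pattern_length_alt
  rw [pvALoop_eq_pvF pattern.toList pattern.toList.length 0 0 (by omega),
      pvBLoop_eq_pvF pattern.toList.length pattern.toList 0 (le_refl _)]
  simp
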